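-- pv_equiv track=rewrite | github.com/JennyX212/PHISGAE | code/protein_f.py | physical_chemical_feature
-- ===== SOURCE A (Python) =====
-- from collections import Counter
--
-- def physical_chemical_feature(sequence):
--     seq_new=sequence.replace('X','').replace('U','').replace('B','').replace('Z','').replace('J','').replace('-','')
--     CE = 'CHONS'
--     Chemi_stats = {'A':{'C': 3, 'H': 7, 'O': 2, 'N': 1, 'S': 0},
--                    'C':{'C': 3, 'H': 7, 'O': 2, 'N': 1, 'S': 1},
--                    'D':{'C': 4, 'H': 7, 'O': 4, 'N': 1, 'S': 0},
--                    'E':{'C': 5, 'H': 9, 'O': 4, 'N': 1, 'S': 0},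
--                    'F':{'C': 9, 'H': 11,'O': 2, 'N': 1, 'S': 0},
--                    'G':{'C': 2, 'H': 5, 'O': 2, 'N': 1, 'S': 0},
--                    'H':{'C': 6, 'H': 9, 'O': 2, 'N': 3, 'S': 0},
--                    'I':{'C': 6, 'H': 13,'O': 2, 'N': 1, 'S': 0},
--                    'K':{'C': 6, 'H': 14,'O': 2, 'N': 2, 'S': 0},
--                    'L':{'C': 6, 'H': 13,'O': 2, 'N': 1, 'S': 0},
--                    'M':{'C': 5, 'H': 11,'O': 2, 'N': 1, 'S': 1},
--                    'N':{'C': 4, 'H': 8, 'O': 3, 'N': 2, 'S': 0},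
--                    'P':{'C': 5, 'H': 9, 'O': 2, 'N': 1, 'S': 0},
--                    'Q':{'C': 5, 'H': 10,'O': 3, 'N': 2, 'S': 0},
--                    'R':{'C': 6, 'H': 14,'O': 2, 'N': 4, 'S': 0},
--                    'S':{'C': 3, 'H': 7, 'O': 3, 'N': 1, 'S': 0},
--                    'T':{'C': 4, 'H': 9, 'O': 3, 'N': 1, 'S': 0},
--                    'V':{'C': 5, 'H': 11,'O': 2, 'N': 1, 'S': 0},
--                    'W':{'C': 11,'H': 12,'O': 2, 'N': 2, 'S': 0},
--                    'Y':{'C': 9, 'H': 11,'O': 3, 'N': 1, 'S': 0}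
--                 }
--
--     count = Counter(seq_new)
--     code = []
--
--     for c in CE:
--         abundance_c = 0
--         for key in count:
--             num_c = Chemi_stats[key][c]
--             abundance_c += num_c * count[key]
--
--         code.append(abundance_c)
--     return(code)
-- ===== SOURCE B (Python) =====
-- # One residue-major pass with five accumulators instead of Counter + per-element rescans.
-- # Residue-major single pass: five running totals, no Counter, no per-element rescan.
-- _SKIP = 'XUBZJ-'
-- _ATOMS = {'A': (3, 7, 2, 1, 0),
--           'C': (3, 7, 2, 1, 1),
--           'D': (4, 7, 4, 1, 0),
--           'E': (5, 9, 4, 1, 0),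
--           'F': (9, 11, 2, 1, 0),
--           'G': (2, 5, 2, 1, 0),
--           'H': (6, 9, 2, 3, 0),
--           'I': (6, 13, 2, 1, 0),
--           'K': (6, 14, 2, 2, 0),
--           'L': (6, 13, 2, 1, 0),
--           'M': (5, 11, 2, 1, 1),
--           'N': (4, 8, 3, 2, 0),
--           'P': (5, 9, 2, 1, 0),
--           'Q': (5, 10, 3, 2, 0),
--           'R': (6, 14, 2, 4, 0),
--           'S': (3, 7, 3, 1, 0),
--           'T': (4, 9, 3, 1, 0),
--           'V': (5, 11, 2, 1, 0),
--           'W': (11, 12, 2, 2, 0),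
--           'Y': (9, 11, 3, 1, 0)}
--
-- def physical_chemical_feature(sequence):
--     c = h = o = n = s = 0
--     for ch in sequence:
--         if ch in _SKIP:
--             continue
--         ac, ah, ao, an, asv = _ATOMS[ch]
--         c += ac
--         h += ah
--         o += ao
--         n += an
--         s += asv
--     return [c, h, o, n, s]
-- ===== Notes on version B (the rewrite author's own statement) =====
-- stated objective: simpler
-- what changed: Replaces the Counter build plus an element-major rescan of the unique-residue set per output element (and the six chained replace() cleaning passes) with a single residue-major pass over the raw sequence that skips the stripped characters inline and adds all five atom counts of each residue to five accumulators.
import Mathlib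
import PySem

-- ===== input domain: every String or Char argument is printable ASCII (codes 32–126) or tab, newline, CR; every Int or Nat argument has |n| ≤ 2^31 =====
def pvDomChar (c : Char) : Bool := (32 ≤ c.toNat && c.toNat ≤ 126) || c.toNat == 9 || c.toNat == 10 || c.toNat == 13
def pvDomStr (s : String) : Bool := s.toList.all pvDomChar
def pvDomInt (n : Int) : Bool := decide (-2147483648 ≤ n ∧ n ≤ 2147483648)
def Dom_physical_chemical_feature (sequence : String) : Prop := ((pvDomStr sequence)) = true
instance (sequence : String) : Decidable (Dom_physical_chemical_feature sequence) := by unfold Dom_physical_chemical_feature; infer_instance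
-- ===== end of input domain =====

-- B replaces A's Counter build plus one element-major rescan of the unique residues per element
-- of 'CHONS' (and the six chained replace() passes) by a single residue-major pass with five
-- running totals; objective: simpler (one plain loop instead of several passes).

-- ===== PORT A =====
-- Chemi_stats[key][c]: nested dict lookups; unknown key/element is a Python KeyError,
-- excluded by Pre_ below (the 0 default is never reached on admitted inputs).
def pvChemiStats (key : Char) (c : Char) : Int :=
  match key with
  | 'A' => (match c with | 'C' => 3 | 'H' => 7  | 'O' => 2 | 'N' => 1 | 'S' => 0 | _ => 0)
  | 'C' => (match c with | 'C' => 3 | 'H' => 7  | 'O' => 2 | 'N' => 1 | 'S' => 1 | _ => 0)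
  | 'D' => (match c with | 'C' => 4 | 'H' => 7  | 'O' => 4 | 'N' => 1 | 'S' => 0 | _ => 0)
  | 'E' => (match c with | 'C' => 5 | 'H' => 9  | 'O' => 4 | 'N' => 1 | 'S' => 0 | _ => 0)
  | 'F' => (match c with | 'C' => 9 | 'H' => 11 | 'O' => 2 | 'N' => 1 | 'S' => 0 | _ => 0)
  | 'G' => (match c with | 'C' => 2 | 'H' => 5  | 'O' => 2 | 'N' => 1 | 'S' => 0 | _ => 0)
  | 'H' => (match c with | 'C' => 6 | 'H' => 9  | 'O' => 2 | 'N' => 3 | 'S' => 0 | _ => 0)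
  | 'I' => (match c with | 'C' => 6 | 'H' => 13 | 'O' => 2 | 'N' => 1 | 'S' => 0 | _ => 0)
  | 'K' => (match c with | 'C' => 6 | 'H' => 14 | 'O' => 2 | 'N' => 2 | 'S' => 0 | _ => 0)
  | 'L' => (match c with | 'C' => 6 | 'H' => 13 | 'O' => 2 | 'N' => 1 | 'S' => 0 | _ => 0)
  | 'M' => (match c with | 'C' => 5 | 'H' => 11 | 'O' => 2 | 'N' => 1 | 'S' => 1 | _ => 0)
  | 'N' => (match c with | 'C' => 4 | 'H' => 8  | 'O' => 3 | 'N' => 2 | 'S' => 0 | _ => 0)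
  | 'P' => (match c with | 'C' => 5 | 'H' => 9  | 'O' => 2 | 'N' => 1 | 'S' => 0 | _ => 0)
  | 'Q' => (match c with | 'C' => 5 | 'H' => 10 | 'O' => 3 | 'N' => 2 | 'S' => 0 | _ => 0)
  | 'R' => (match c with | 'C' => 6 | 'H' => 14 | 'O' => 2 | 'N' => 4 | 'S' => 0 | _ => 0)
  | 'S' => (match c with | 'C' => 3 | 'H' => 7  | 'O' => 3 | 'N' => 1 | 'S' => 0 | _ => 0)
  | 'T' => (match c with | 'C' => 4 | 'H' => 9  | 'O' => 3 | 'N' => 1 | 'S' => 0 | _ => 0)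
  | 'V' => (match c with | 'C' => 5 | 'H' => 11 | 'O' => 2 | 'N' => 1 | 'S' => 0 | _ => 0)
  | 'W' => (match c with | 'C' => 11| 'H' => 12 | 'O' => 2 | 'N' => 2 | 'S' => 0 | _ => 0)
  | 'Y' => (match c with | 'C' => 9 | 'H' => 11 | 'O' => 3 | 'N' => 1 | 'S' => 0 | _ => 0)
  | _   => 0

def physical_chemical_feature (sequence : String) : List Int :=
  let seq_new := PySem.Str.replace (PySem.Str.replace (PySem.Str.replace (PySem.Str.replace
      (PySem.Str.replace (PySem.Str.replace sequence "X" "") "U" "") "B" "") "Z" "") "J" "") "-" ""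
  let count := PySem.Dict.counter seq_new.toList
  List.foldl (fun code c =>
      code ++ [List.foldl (fun abundance_c key =>
                  abundance_c + pvChemiStats key c * count.getD key 0) 0 count.keys])
    [] "CHONS".toList

-- ===== PORT B =====
-- _ATOMS[ch]: unknown residue is a Python KeyError, excluded by Pre_ below.
def pvAtoms (ch : Char) : Int × Int × Int × Int × Int :=
  match ch with
  | 'A' => (3, 7, 2, 1, 0)
  | 'C' => (3, 7, 2, 1, 1)
  | 'D' => (4, 7, 4, 1, 0)
  | 'E' => (5, 9, 4, 1, 0)
  | 'F' => (9, 11, 2, 1, 0)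
  | 'G' => (2, 5, 2, 1, 0)
  | 'H' => (6, 9, 2, 3, 0)
  | 'I' => (6, 13, 2, 1, 0)
  | 'K' => (6, 14, 2, 2, 0)
  | 'L' => (6, 13, 2, 1, 0)
  | 'M' => (5, 11, 2, 1, 1)
  | 'N' => (4, 8, 3, 2, 0)
  | 'P' => (5, 9, 2, 1, 0)
  | 'Q' => (5, 10, 3, 2, 0)
  | 'R' => (6, 14, 2, 4, 0)
  | 'S' => (3, 7, 3, 1, 0)
  | 'T' => (4, 9, 3, 1, 0)
  | 'V' => (5, 11, 2, 1, 0)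
  | 'W' => (11, 12, 2, 2, 0)
  | 'Y' => (9, 11, 3, 1, 0)
  | _   => (0, 0, 0, 0, 0)

def physical_chemical_feature_alt (sequence : String) : List Int :=
  let r := sequence.toList.foldl (fun acc ch =>
      if ch ∈ ['X', 'U', 'B', 'Z', 'J', '-'] then acc
      else
        let t := pvAtoms ch
        (acc.1 + t.1, acc.2.1 + t.2.1, acc.2.2.1 + t.2.2.1, acc.2.2.2.1 + t.2.2.2.1,
          acc.2.2.2.2 + t.2.2.2.2))
    ((0 : Int), (0 : Int), (0 : Int), (0 : Int), (0 : Int))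
  [r.1, r.2.1, r.2.2.1, r.2.2.2.1, r.2.2.2.2]

-- ===== PRECONDITION & SPEC =====
-- Pre_: exactly the inputs where A returns — every character is one of the 20 residue letters
-- or one of the stripped characters X,U,B,Z,J,-; on any other character A raises KeyError.
def Pre_physical_chemical_feature (sequence : String) : Prop :=
  (sequence.toList.all (fun ch =>
    (['A', 'C', 'D', 'E', 'F', 'G', 'H', 'I', 'K', 'L', 'M', 'N', 'P', 'Q', 'R', 'S', 'T',
      'V', 'W', 'Y', 'X', 'U', 'B', 'Z', 'J', '-']).contains ch)) = true
instance (sequence : String) : Decidable (Pre_physical_chemical_feature sequence) := by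
  unfold Pre_physical_chemical_feature; infer_instance
def pvWitness_physical_chemical_feature : String := "MACKX-W"

def Spec_physical_chemical_feature (sequence : String) (out : List Int) : Prop := out = physical_chemical_feature_alt sequence
instance (sequence : String) (out : List Int) : Decidable (Spec_physical_chemical_feature sequence out) := by unfold Spec_physical_chemical_feature; infer_instance

-- ===== CLAIM (what is proved, stated in full; the proofs are below) =====
def Claim_equal_physical_chemical_feature : Prop := ∀ (sequence : String), Dom_physical_chemical_feature sequence → Pre_physical_chemical_feature sequence → Spec_physical_chemical_feature sequence (physical_chemical_feature sequence)

-- ===== LEMMAS AND PROOFS =====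

-- str.replace(x, '') with a single-character needle removes exactly the occurrences of x.
theorem pv_replace_go_single (x : Char) : ∀ (fuel : Nat) (l acc : List Char),
    l.length ≤ fuel →
    PySem.Chars.replace.go [x] [] fuel l acc = acc.reverse ++ l.filter (· != x) := by
  intro fuel
  induction fuel with
  | zero =>
    intro l acc h
    have : l = [] := List.eq_nil_of_length_eq_zero (Nat.le_zero.mp h)
    subst this
    simp [PySem.Chars.replace.go]
  | succ n ih =>
    intro l acc h
    cases l with
    | nil => simp [PySem.Chars.replace.go]
    | cons c t =>
      rw [PySem.Chars.replace.go]
      by_cases hxc : x = c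
      · subst hxc
        have hpre : List.isPrefixOf [x] (x :: t) = true := by
          simp [List.isPrefixOf]
        simp only [hpre, if_pos]
        rw [ih _ _ (by simpa using Nat.le_of_succ_le_succ (by simpa using h))]
        simp
      · have hpre : List.isPrefixOf [x] (c :: t) = false := by
          simp [List.isPrefixOf, hxc]
        simp only [hpre]
        rw [if_neg (by simp)]
        rw [ih _ _ (by simpa using Nat.le_of_succ_le_succ (by simpa using h))]
        simp [Ne.symm hxc]

theorem pv_replace_single (x : Char) (cs : List Char) :
    PySem.Chars.replace cs [x] [] = cs.filter (· != x) := by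
  rw [PySem.Chars.replace]
  simp only [List.isEmpty_cons, if_false, Bool.false_eq_true]
  simpa using pv_replace_go_single x cs.length cs [] le_rfl

-- a sum of an indicator over a nodup list containing x
theorem pv_sum_ite_mem (x : Char) (v : Int) :
    ∀ (l : List Char), l.Nodup → x ∈ l →
      (l.map (fun k => if x = k then v else 0)).sum = v := by
  intro l
  induction l with
  | nil => intro _ h; simp at h
  | cons a t ih =>
    intro hnd hx
    rcases List.mem_cons.mp hx with rfl | hxt
    · have hxt : x ∉ t := (List.nodup_cons.mp hnd).1
      have : (t.map (fun k => if x = k then v else 0)).sum = 0 := by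
        apply List.sum_eq_zero
        intro y hy
        rcases List.mem_map.mp hy with ⟨k, hk, rfl⟩
        have : x ≠ k := fun h => hxt (h ▸ hk)
        simp [this]
      simp [this]
    · have hax : x ≠ a := by
        rintro rfl; exact (List.nodup_cons.mp hnd).1 hxt
      simp [hax, ih (List.nodup_cons.mp hnd).2 hxt]

-- element-major sum over the distinct residues weighted by multiplicity
-- equals the residue-major sum over the whole list
theorem pv_sum_mul_count (f : Char → Int) (L : List Char) :
    ((PySem.Set.ofList L).map (fun k => f k * (L.count k : Int))).sum = (L.map f).sum := by
  induction L using List.reverseRecOn with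
  | nil => simp [PySem.Set.ofList_nil]
  | append_singleton L x ih =>
    rw [PySem.Set.ofList_append_singleton]
    have hcount : ∀ k, ((L ++ [x]).count k : Int) = (L.count k : Int) + (if x = k then 1 else 0) := by
      intro k
      by_cases h : x = k <;> simp [List.count_append, h]
    by_cases hmem : x ∈ PySem.Set.ofList L
    · rw [PySem.Set.add_of_mem hmem]
      have : ((PySem.Set.ofList L).map (fun k => f k * ((L ++ [x]).count k : Int))).sum
          = ((PySem.Set.ofList L).map (fun k => f k * (L.count k : Int) + (if x = k then f x else 0))).sum := by
        apply congrArg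
        apply List.map_congr_left
        intro k _
        rw [hcount k]
        by_cases h : x = k <;> simp [h, mul_add]
      rw [this, PySem.List.sum_map_add_int, ih,
        pv_sum_ite_mem x (f x) _ (PySem.Set.nodup_ofList L) hmem]
      simp
    · rw [PySem.Set.add_of_not_mem hmem]
      rw [List.map_append, List.sum_append]
      have h1 : ((PySem.Set.ofList L).map (fun k => f k * ((L ++ [x]).count k : Int))).sum
          = ((PySem.Set.ofList L).map (fun k => f k * (L.count k : Int))).sum := by
        apply congrArg
        apply List.map_congr_left
        intro k hk
        have : x ≠ k := fun h => hmem (h ▸ hk)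
        rw [hcount k]; simp [this]
      have hx0 : (L.count x : Int) = 0 := by
        have : x ∉ L := fun h => hmem ((PySem.Set.mem_ofList L x).mpr h)
        simp [List.count_eq_zero_of_not_mem this]
      rw [h1, ih]
      simp [List.count_append, hx0]

-- B's five-accumulator fold, in closed form
theorem pv_fold5 (L : List Char) : ∀ (a b c d e : Int),
    L.foldl (fun acc ch =>
        let t := pvAtoms ch
        (acc.1 + t.1, acc.2.1 + t.2.1, acc.2.2.1 + t.2.2.1, acc.2.2.2.1 + t.2.2.2.1,
          acc.2.2.2.2 + t.2.2.2.2)) (a, b, c, d, e)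
      = (a + (L.map (fun ch => (pvAtoms ch).1)).sum,
         b + (L.map (fun ch => (pvAtoms ch).2.1)).sum,
         c + (L.map (fun ch => (pvAtoms ch).2.2.1)).sum,
         d + (L.map (fun ch => (pvAtoms ch).2.2.2.1)).sum,
         e + (L.map (fun ch => (pvAtoms ch).2.2.2.2)).sum) := by
  induction L with
  | nil => intro a b c d e; simp
  | cons x t ih =>
    intro a b c d e
    simp only [List.foldl_cons, List.map_cons, List.sum_cons]
    rw [ih]
    refine Prod.ext (by ring) (Prod.ext (by ring) (Prod.ext (by ring) (Prod.ext (by ring) (by ring))))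

-- on the 20 residue letters the two tables agree componentwise
theorem pv_tables_agree :
    ∀ ch ∈ ['A', 'C', 'D', 'E', 'F', 'G', 'H', 'I', 'K', 'L', 'M', 'N', 'P', 'Q', 'R', 'S', 'T',
            'V', 'W', 'Y'],
      pvChemiStats ch 'C' = (pvAtoms ch).1 ∧ pvChemiStats ch 'H' = (pvAtoms ch).2.1 ∧
      pvChemiStats ch 'O' = (pvAtoms ch).2.2.1 ∧ pvChemiStats ch 'N' = (pvAtoms ch).2.2.2.1 ∧
      pvChemiStats ch 'S' = (pvAtoms ch).2.2.2.2 := by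
  intro ch h
  fin_cases h <;> exact ⟨rfl, rfl, rfl, rfl, rfl⟩

-- the chained single-character replaces equal one filter
theorem pv_clean_eq (cs : List Char) :
    PySem.Chars.replace (PySem.Chars.replace (PySem.Chars.replace (PySem.Chars.replace
        (PySem.Chars.replace (PySem.Chars.replace cs ['X'] []) ['U'] []) ['B'] []) ['Z'] [])
        ['J'] []) ['-'] []
      = cs.filter (fun ch => decide (ch ∉ ['X', 'U', 'B', 'Z', 'J', '-'])) := by
  simp only [pv_replace_single, List.filter_filter]
  apply List.filter_congr
  intro ch _
  by_cases h1 : ch = 'X' <;> by_cases h2 : ch = 'U' <;> by_cases h3 : ch = 'B' <;>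
    by_cases h4 : ch = 'Z' <;> by_cases h5 : ch = 'J' <;> by_cases h6 : ch = '-' <;>
    simp [h1, h2, h3, h4, h5, h6]

-- ===== VERDICT (by name: the statement is the Claim_ definition above) =====
set_option maxHeartbeats 1600000 in
theorem physical_chemical_feature_spec : Claim_equal_physical_chemical_feature := by
  intro sequence _ hpre
  unfold Spec_physical_chemical_feature physical_chemical_feature physical_chemical_feature_alt
  have hX : ("X" : String).toList = ['X'] := rfl
  have hU : ("U" : String).toList = ['U'] := rfl
  have hB : ("B" : String).toList = ['B'] := rfl
  have hZ : ("Z" : String).toList = ['Z'] := rfl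
  have hJ : ("J" : String).toList = ['J'] := rfl
  have hD : ("-" : String).toList = ['-'] := rfl
  have hE : ("" : String).toList = [] := rfl
  have hCE : ("CHONS" : String).toList = ['C', 'H', 'O', 'N', 'S'] := rfl
  simp only [PySem.Str.toList_replace, hX, hU, hB, hZ, hJ, hD, hE, hCE, pv_clean_eq]
  set L := sequence.toList.filter (fun ch => decide (ch ∉ ['X', 'U', 'B', 'Z', 'J', '-'])) with hLdef
  -- every residue of the cleaned sequence is one of the 20 residue letters
  have hmemL : ∀ ch ∈ L,
      pvChemiStats ch 'C' = (pvAtoms ch).1 ∧ pvChemiStats ch 'H' = (pvAtoms ch).2.1 ∧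
      pvChemiStats ch 'O' = (pvAtoms ch).2.2.1 ∧ pvChemiStats ch 'N' = (pvAtoms ch).2.2.2.1 ∧
      pvChemiStats ch 'S' = (pvAtoms ch).2.2.2.2 := by
    intro ch hch
    have h1 : ch ∈ sequence.toList := List.mem_of_mem_filter hch
    have h2 : ch ∉ ['X', 'U', 'B', 'Z', 'J', '-'] := by
      have := List.of_mem_filter hch
      simpa using this
    have h3 : ch ∈ ['A', 'C', 'D', 'E', 'F', 'G', 'H', 'I', 'K', 'L', 'M', 'N', 'P', 'Q', 'R',
        'S', 'T', 'V', 'W', 'Y', 'X', 'U', 'B', 'Z', 'J', '-'] := by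
      have := List.all_eq_true.mp hpre ch h1
      simpa using this
    apply pv_tables_agree
    simp only [List.mem_cons, List.not_mem_nil, or_false] at h2 h3 ⊢
    tauto
  -- A's inner per-element loop, in closed form
  have hA : ∀ c : Char,
      List.foldl (fun abundance_c key =>
          abundance_c + pvChemiStats key c * (PySem.Dict.counter L).getD key 0) 0
        (PySem.Dict.counter L).keys
      = (L.map (fun k => pvChemiStats k c)).sum := by
    intro c
    rw [PySem.Dict.keys_counter, PySem.List.foldl_add]
    simp only [PySem.Dict.getD_counter]
    rw [pv_sum_mul_count (fun k => pvChemiStats k c) L]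
    simp
  simp only [List.foldl_cons, List.foldl_nil, List.nil_append, List.cons_append]
  rw [hA 'C', hA 'H', hA 'O', hA 'N', hA 'S']
  -- B's loop: the inline skip is a filter
  have hswap : (fun (acc : Int × Int × Int × Int × Int) ch =>
        if ch ∈ ['X', 'U', 'B', 'Z', 'J', '-'] then acc
        else
          let t := pvAtoms ch
          (acc.1 + t.1, acc.2.1 + t.2.1, acc.2.2.1 + t.2.2.1, acc.2.2.2.1 + t.2.2.2.1,
            acc.2.2.2.2 + t.2.2.2.2))
      = (fun (acc : Int × Int × Int × Int × Int) ch =>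
          if ch ∉ ['X', 'U', 'B', 'Z', 'J', '-'] then
            let t := pvAtoms ch
            (acc.1 + t.1, acc.2.1 + t.2.1, acc.2.2.1 + t.2.2.1, acc.2.2.2.1 + t.2.2.2.1,
              acc.2.2.2.2 + t.2.2.2.2)
          else acc) := by
    funext acc ch
    by_cases h : ch ∈ ['X', 'U', 'B', 'Z', 'J', '-'] <;> simp [h]
  rw [hswap, PySem.List.foldl_ite_eq_foldl_filter, ← hLdef, pv_fold5, zero_add, zero_add,
    zero_add, zero_add, zero_add]
  -- componentwise, the two residue tables agree on L
  have e1 : L.map (fun k => pvChemiStats k 'C') = L.map (fun ch => (pvAtoms ch).1) :=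
    List.map_congr_left (fun ch hch => (hmemL ch hch).1)
  have e2 : L.map (fun k => pvChemiStats k 'H') = L.map (fun ch => (pvAtoms ch).2.1) :=
    List.map_congr_left (fun ch hch => (hmemL ch hch).2.1)
  have e3 : L.map (fun k => pvChemiStats k 'O') = L.map (fun ch => (pvAtoms ch).2.2.1) :=
    List.map_congr_left (fun ch hch => (hmemL ch hch).2.2.1)
  have e4 : L.map (fun k => pvChemiStats k 'N') = L.map (fun ch => (pvAtoms ch).2.2.2.1) :=
    List.map_congr_left (fun ch hch => (hmemL ch hch).2.2.2.1)
  have e5 : L.map (fun k => pvChemiStats k 'S') = L.map (fun ch => (pvAtoms ch).2.2.2.2) :=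
    List.map_congr_left (fun ch hch => (hmemL ch hch).2.2.2.2)
  rw [e1, e2, e3, e4, e5]
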